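-- pv_equiv track=rewrite | github.com/BrenoGustavo/AdventoOfCode | 2024/solutions/day_9.py | mover_blocos_individuais
-- ===== SOURCE A (Python) =====
-- def mover_blocos_individuais(disco: list[str]) -> list[str]:
--     """Move blocos um por um da direita para a esquerda."""
--     i = len(disco) - 1
--     while i >= 0:
--         if disco[i] != ".":
--             for j in range(i):
--                 if disco[j] == ".":
--                     disco[j], disco[i] = disco[i], "."
--                     break
--         i -= 1
--     return disco
-- ===== SOURCE B (Python) =====
-- def mover_blocos_individuais(disco: list[str]) -> list[str]:
--     """Compacta em uma passada: conta blocos, preenche os buracos do prefixo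
--     com os blocos da cauda tomados da direita para a esquerda."""
--     k = sum(1 for x in disco if x != ".")
--     movers = [x for x in disco[k:] if x != "."]
--     out = []
--     for p in range(k):
--         if disco[p] != ".":
--             out.append(disco[p])
--         else:
--             out.append(movers.pop())
--     out.extend(["."] * (len(disco) - k))
--     disco[:] = out
--     return disco
-- ===== Notes on version B (the rewrite author's own statement) =====
-- stated objective: faster
-- what changed: Replaces A's right-to-left while loop with an inner leftward rescan per block (quadratic swapping) by one counting pass plus one fill pass: count the non-dot blocks k, then fill the dots among the first k slots with the tail's blocks taken right-to-left and pad with dots.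
import Mathlib
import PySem

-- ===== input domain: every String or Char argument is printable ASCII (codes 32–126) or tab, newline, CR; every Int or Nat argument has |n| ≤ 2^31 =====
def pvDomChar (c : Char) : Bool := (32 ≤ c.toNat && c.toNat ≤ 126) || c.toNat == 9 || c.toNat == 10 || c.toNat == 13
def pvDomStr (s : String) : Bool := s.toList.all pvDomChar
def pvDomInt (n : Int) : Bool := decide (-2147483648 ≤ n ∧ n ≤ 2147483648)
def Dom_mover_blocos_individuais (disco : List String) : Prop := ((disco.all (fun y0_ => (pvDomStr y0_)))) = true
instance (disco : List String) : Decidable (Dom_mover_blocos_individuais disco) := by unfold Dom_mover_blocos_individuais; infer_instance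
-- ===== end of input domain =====

-- ===== PORT A =====
-- B changes the algorithm: one counting pass plus one fill pass instead of A's quadratic
-- rescans; both mutate `disco` in place in Python, equivalence here is about the returned list.
-- inner 'for j in range(i): if disco[j] == ".": ... break' = first-dot search over disco[:i]
def pvIdxDotA : List String → Option Nat
  | [] => none
  | h :: t => if h = "." then some 0 else (pvIdxDotA t).map (· + 1)

-- one iteration of the while body at index i (indices are always in range, so getD is exact)
def pvBodyA (d : List String) (i : Nat) : List String :=
  if d.getD i "" ≠ "." then
    match pvIdxDotA (d.take i) with
    | some j => (d.set j (d.getD i "")).set i "."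
    | none => d
  else d

-- 'i = len-1; while i >= 0: ...; i -= 1'
def pvLoopA : List String → Nat → List String
  | d, 0 => d
  | d, i + 1 => pvLoopA (pvBodyA d i) i

def mover_blocos_individuais (disco : List String) : List String :=
  pvLoopA disco disco.length

-- ===== PORT B =====
-- the 'for p in range(k)' loop of Source B: scan disco[:k], popping movers at each "."
-- (movers.pop() never runs on an empty list in Python; getLastD's default is unreachable)
def pvFillB : List String → List String → List String
  | [], _ => []
  | h :: t, m => if h ≠ "." then h :: pvFillB t m else m.getLastD "." :: pvFillB t m.dropLast

def mover_blocos_individuais_alt (disco : List String) : List String :=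
  let k := disco.countP (fun x => x != ".")
  pvFillB (disco.take k) ((disco.drop k).filter (fun x => x != ".")) ++
    List.replicate (disco.length - k) "."

-- ===== PRECONDITION & SPEC =====
def Spec_mover_blocos_individuais (disco : List String) (out : List String) : Prop := out = mover_blocos_individuais_alt disco
instance (disco : List String) (out : List String) : Decidable (Spec_mover_blocos_individuais disco out) := by unfold Spec_mover_blocos_individuais; infer_instance

-- ===== CLAIM (what is proved, stated in full; the proofs are below) =====
def Claim_equal_mover_blocos_individuais : Prop := ∀ (disco : List String), Dom_mover_blocos_individuais disco → Spec_mover_blocos_individuais disco (mover_blocos_individuais disco)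

-- ===== LEMMAS AND PROOFS =====

theorem pvIdxDotA_spec (d : List String) (j : Nat) (h : pvIdxDotA d = some j) :
    j < d.length ∧ d.getD j "" = "." ∧ ∀ k < j, d.getD k "" ≠ "." := by
  induction d generalizing j with
  | nil => simp [pvIdxDotA] at h
  | cons a t ih =>
    by_cases ha : a = "."
    · simp [pvIdxDotA, ha] at h
      subst h
      refine ⟨by simp, by simp [ha], by omega⟩
    · simp [pvIdxDotA, ha] at h
      obtain ⟨j', hj', rfl⟩ := h
      obtain ⟨h1, h2, h3⟩ := ih j' hj'
      refine ⟨by simpa using h1, by simpa using h2, ?_⟩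
      intro k hk
      cases k with
      | zero => simpa using ha
      | succ k => simpa using h3 k (by omega)

theorem pvIdxDotA_none (d : List String) (h : pvIdxDotA d = none) :
    ∀ k < d.length, d.getD k "" ≠ "." := by
  induction d with
  | nil => simp
  | cons a t ih =>
    by_cases ha : a = "."
    · simp [pvIdxDotA, ha] at h
    · simp [pvIdxDotA, ha] at h
      intro k hk
      cases k with
      | zero => simpa using ha
      | succ k => simpa using ih h k (by simpa using hk)

theorem pvIdxDotA_take (d : List String) (j m : Nat) (h : pvIdxDotA d = some j) (hm : j < m) :
    pvIdxDotA (d.take m) = some j := by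
  induction d generalizing j m with
  | nil => simp [pvIdxDotA] at h
  | cons a t ih =>
    cases m with
    | zero => omega
    | succ m =>
      by_cases ha : a = "."
      · simp [pvIdxDotA, ha] at h ⊢; omega
      · simp [pvIdxDotA, ha] at h ⊢
        obtain ⟨j', hj', rfl⟩ := h
        exact ⟨j', ih j' m hj' (by omega), rfl⟩

theorem pvBodyA_append (d : List String) (y : String) (i : Nat) (hi : i < d.length) :
    pvBodyA (d ++ [y]) i = pvBodyA d i ++ [y] := by
  simp only [pvBodyA, List.getD_append d [y] "" i hi,
    List.take_append_of_le_length (le_of_lt hi)]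
  split_ifs with hc
  · cases hfind : pvIdxDotA (d.take i) with
    | none => rfl
    | some j =>
      have hj : j < i := by
        have := (pvIdxDotA_spec _ _ hfind).1
        have h2 : j < min i d.length := by simpa using this
        omega
      have hjd : j < d.length := lt_trans hj hi
      show ((d ++ [y]).set j (d.getD i "")).set i "." =
        (d.set j (d.getD i "")).set i "." ++ [y]
      rw [List.set_append_left j _ hjd,
        List.set_append_left i _ (by simpa using hi)]
  · rfl

theorem pvBodyA_length (d : List String) (i : Nat) : (pvBodyA d i).length = d.length := by
  simp only [pvBodyA]
  split_ifs with hc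
  · cases hfind : pvIdxDotA (d.take i) <;> simp
  · rfl

theorem pvLoopA_append (d : List String) (y : String) (i : Nat) (hi : i ≤ d.length) :
    pvLoopA (d ++ [y]) i = pvLoopA d i ++ [y] := by
  induction i generalizing d with
  | zero => rfl
  | succ i ih =>
    simp only [pvLoopA]
    rw [pvBodyA_append d y i (by omega), ih _ (by rw [pvBodyA_length]; omega)]

theorem portA_concat (d : List String) (x : String) :
    mover_blocos_individuais (d ++ [x]) =
      if x ≠ "." then
        match pvIdxDotA d with
        | some j => mover_blocos_individuais (d.set j x) ++ ["."]
        | none => mover_blocos_individuais d ++ [x]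
      else mover_blocos_individuais d ++ [x] := by
  have hlen : (d ++ [x]).length = d.length + 1 := by simp
  have hget : (d ++ [x]).getD d.length "" = x := by simp [List.getD]
  simp only [mover_blocos_individuais, hlen, pvLoopA, pvBodyA, hget, List.take_left]
  split_ifs with hc
  · cases hfind : pvIdxDotA d with
    | none => exact pvLoopA_append d x d.length (le_refl _)
    | some j =>
      have hjd : j < d.length := (pvIdxDotA_spec _ _ hfind).1
      show pvLoopA (((d ++ [x]).set j x).set d.length ".") d.length =
        pvLoopA (d.set j x) (d.set j x).length ++ ["."]
      rw [List.set_append_left j _ hjd]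
      have : (d.set j x ++ [x]).set d.length "." = d.set j x ++ ["."] := by
        have h0 : (d.set j x).length = d.length := List.length_set ..
        rw [← h0, List.set_append_right _ _ (le_refl _)]; simp
      rw [this, List.length_set]
      exact pvLoopA_append (d.set j x) "." d.length (by simp)
  · exact pvLoopA_append d x d.length (le_refl _)

theorem pvFillB_no_dot (p m : List String) (h : ∀ s ∈ p, s ≠ ".") : pvFillB p m = p := by
  induction p with
  | nil => rfl
  | cons a t ih =>
    have ha : a ≠ "." := h a (by simp)
    simp [pvFillB, ha, ih (fun s hs => h s (by simp [hs]))]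

theorem pvFillB_pop (p m : List String) (x : String) (hx : x ≠ ".") (j : Nat)
    (h : pvIdxDotA p = some j) :
    pvFillB p (m ++ [x]) = pvFillB (p.set j x) m := by
  induction p generalizing j with
  | nil => simp [pvIdxDotA] at h
  | cons a t ih =>
    by_cases ha : a = "."
    · simp [pvIdxDotA, ha] at h
      subst h
      simp [pvFillB, ha, hx]
    · simp [pvIdxDotA, ha] at h
      obtain ⟨j', hj', rfl⟩ := h
      simp [pvFillB, ha, ih j' hj']

theorem countP_set_dot (l : List String) (i : Nat) (a : String)
    (hi : i < l.length) (hd : l.getD i "" = ".") (ha : a ≠ ".") :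
    (l.set i a).countP (fun x => x != ".") = l.countP (fun x => x != ".") + 1 := by
  induction l generalizing i with
  | nil => simp at hi
  | cons b t ih =>
    cases i with
    | zero =>
      have hb : b = "." := by simpa [List.getD] using hd
      simp [hb, ha]
    | succ i =>
      have : (t.set i a).countP (fun x => x != ".") = t.countP (fun x => x != ".") + 1 :=
        ih i (by simpa using hi) (by simpa [List.getD] using hd)
      simp [List.countP_cons, this]
      omega

theorem le_countP_of_prefix_nondot (l : List String) (j : Nat) (hj : j ≤ l.length)
    (h : ∀ m < j, l.getD m "" ≠ ".") : j ≤ l.countP (fun x => x != ".") := by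
  induction l generalizing j with
  | nil => simpa using hj
  | cons b t ih =>
    cases j with
    | zero => omega
    | succ j =>
      have hb : b ≠ "." := by simpa [List.getD] using h 0 (by omega)
      have := ih j (by simpa using hj) (fun m hm => by simpa [List.getD] using h (m+1) (by omega))
      simp [hb]
      omega

theorem alt_concat_dot (e : List String) :
    mover_blocos_individuais_alt (e ++ ["."]) = mover_blocos_individuais_alt e ++ ["."] := by
  have hk : e.countP (fun x => x != ".") ≤ e.length := List.countP_le_length
  have hkc : (e ++ ["."]).countP (fun x => x != ".") = e.countP (fun x => x != ".") := by
    simp [List.countP_append]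
  simp only [mover_blocos_individuais_alt, hkc]
  rw [List.take_append_of_le_length hk, List.drop_append_of_le_length hk]
  rw [List.filter_append]
  have h1 : (e ++ ["."]).length - e.countP (fun x => x != ".") =
      (e.length - e.countP (fun x => x != ".")) + 1 := by simp; omega
  rw [h1, List.replicate_succ']
  simp [List.append_assoc]

theorem alt_concat_none (e : List String) (x : String) (hx : x ≠ ".")
    (h : pvIdxDotA e = none) :
    mover_blocos_individuais_alt (e ++ [x]) = mover_blocos_individuais_alt e ++ [x] := by
  have hnd : ∀ s ∈ e, s ≠ "." := by
    intro s hs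
    obtain ⟨i, hi, rfl⟩ := List.mem_iff_getElem.1 hs
    have := pvIdxDotA_none e h i hi
    rwa [List.getD_eq_getElem e "" hi] at this
  have hk : e.countP (fun x => x != ".") = e.length :=
    List.countP_eq_length.2 (fun a ha => by simpa using hnd a ha)
  have hk' : (e ++ [x]).countP (fun x => x != ".") = e.length + 1 := by
    simp [List.countP_append, hk, hx]
  have h2 : mover_blocos_individuais_alt e = e := by
    simp only [mover_blocos_individuais_alt, hk]
    rw [List.take_of_length_le (le_refl _), List.drop_of_length_le (le_refl _)]
    simp [pvFillB_no_dot e [] hnd]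
  have h3 : mover_blocos_individuais_alt (e ++ [x]) = e ++ [x] := by
    simp only [mover_blocos_individuais_alt, hk']
    have hl : (e ++ [x]).length = e.length + 1 := by simp
    rw [← hl, List.take_of_length_le (le_refl _), List.drop_of_length_le (le_refl _)]
    have : ∀ s ∈ e ++ [x], s ≠ "." := by
      intro s hs
      rcases List.mem_append.1 hs with h' | h'
      · exact hnd s h'
      · simpa using (by simpa using h') ▸ hx
    simp [pvFillB_no_dot _ [] this, hl]
  rw [h2, h3]

theorem alt_concat_some (e : List String) (x : String) (hx : x ≠ ".") (j : Nat)
    (h : pvIdxDotA e = some j) :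
    mover_blocos_individuais_alt (e ++ [x]) =
      mover_blocos_individuais_alt (e.set j x) ++ ["."] := by
  obtain ⟨hjl, hjd, hjm⟩ := pvIdxDotA_spec e j h
  have hjk : j ≤ e.countP (fun x => x != ".") :=
    le_countP_of_prefix_nondot e j (le_of_lt hjl) hjm
  have hdot : "." ∈ e := by
    rw [← hjd, List.getD_eq_getElem e "" hjl]
    exact List.getElem_mem hjl
  have hkl : e.countP (fun x => x != ".") < e.length := by
    rcases lt_or_eq_of_le (List.countP_le_length (l := e) (p := fun x => x != ".")) with h' | h'
    · exact h'
    · exact absurd (List.countP_eq_length.1 h' "." hdot) (by simp)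
  have hk1 : (e ++ [x]).countP (fun x => x != ".") = e.countP (fun x => x != ".") + 1 := by
    simp [List.countP_append, hx]
  have hset : (e.set j x).countP (fun x => x != ".") = e.countP (fun x => x != ".") + 1 :=
    countP_set_dot e j x hjl hjd hx
  simp only [mover_blocos_individuais_alt, hk1, hset]
  rw [List.take_append_of_le_length (by omega), List.drop_append_of_le_length (by omega),
    List.take_set, List.drop_set_of_lt (by omega), List.filter_append]
  have hfx : List.filter (fun x => x != ".") [x] = [x] := by simp [hx]
  rw [hfx, pvFillB_pop _ _ x hx j (pvIdxDotA_take e j _ h (by omega))]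
  have h1 : (e ++ [x]).length - (e.countP (fun x => x != ".") + 1) =
      ((e.set j x).length - (e.countP (fun x => x != ".") + 1)) + 1 := by
    simp; omega
  rw [h1, List.replicate_succ']
  simp [List.append_assoc]

theorem main_aux : ∀ (n : Nat) (d : List String), d.length = n →
    mover_blocos_individuais d = mover_blocos_individuais_alt d := by
  intro n
  induction n using Nat.strong_induction_on with
  | _ n ih =>
    intro d hd
    rcases List.eq_nil_or_concat d with rfl | ⟨e, x, rfl⟩
    · rfl
    · rw [List.concat_eq_append] at hd ⊢
      have hlen : e.length < n := by simp at hd; omega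
      rw [portA_concat]
      by_cases hx : x = "."
      · subst hx
        rw [if_neg (by simp), alt_concat_dot, ih _ hlen e rfl]
      · rw [if_pos hx]
        cases hfind : pvIdxDotA e with
        | none =>
          show mover_blocos_individuais e ++ [x] = _
          rw [alt_concat_none e x hx hfind, ih _ hlen e rfl]
        | some j =>
          show mover_blocos_individuais (e.set j x) ++ ["."] = _
          rw [alt_concat_some e x hx j hfind,
            ih _ (by rw [List.length_set]; exact hlen) (e.set j x) rfl]

-- ===== VERDICT (by name: the statement is the Claim_ definition above) =====
theorem mover_blocos_individuais_spec : Claim_equal_mover_blocos_individuais := by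
  intro d _
  exact main_aux d.length d rfl
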